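-- pv_equiv track=rewrite | github.com/ghorutest/GeekBrains | lesson-04/2_next_is_bigger.py | next_is_bigger
-- ===== SOURCE A (Python) =====
-- def next_is_bigger(source):
--     for el in source:
--         try:
--             if el > prev:
--                 yield el
--         except:
--             pass
--         prev = el
-- ===== SOURCE B (Python) =====
-- def next_is_bigger(source):
--     seq = list(source)
--     out = []
--     for i in range(len(seq) - 1, 0, -1):
--         if seq[i] > seq[i - 1]:
--             out.append(seq[i])
--     out.reverse()
--     yield from out
-- ===== Notes on version B (the rewrite author's own statement) =====
-- stated objective: alternative
-- what changed: Replaces the forward prev-tracking pass (with its NameError-suppressing bare except) by an index loop that scans the list back-to-front, collecting qualifying elements in reverse and reversing the buffer once at the end; no exception handling and no prev variable.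
import Mathlib
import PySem

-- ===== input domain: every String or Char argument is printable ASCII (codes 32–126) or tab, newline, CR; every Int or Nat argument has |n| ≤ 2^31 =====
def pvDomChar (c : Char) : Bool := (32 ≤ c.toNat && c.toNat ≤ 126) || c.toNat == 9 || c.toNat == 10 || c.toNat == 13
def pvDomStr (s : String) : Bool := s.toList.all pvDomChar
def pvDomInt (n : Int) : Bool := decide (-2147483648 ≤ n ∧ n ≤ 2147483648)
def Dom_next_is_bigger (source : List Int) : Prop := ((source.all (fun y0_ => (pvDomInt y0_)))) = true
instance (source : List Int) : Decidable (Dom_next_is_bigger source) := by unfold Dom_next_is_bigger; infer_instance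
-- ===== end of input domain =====

-- B scans the list back-to-front by index, collecting qualifying elements in reverse and
-- reversing once at the end, instead of A's forward pass with a prev variable and a bare except.
-- ===== PORT A =====
def next_is_bigger (source : List Int) : List Int :=
  (source.foldl (fun (st : List Int × Option Int) el =>
      ((match st.2 with
        | some prev => if prev < el then st.1 ++ [el] else st.1
        | none => st.1), some el)) ([], none)).1

-- ===== PORT B =====
def next_is_bigger_alt (source : List Int) : List Int :=
  ((PySem.List.pyRange ((source.length : Int) - 1) 0 (-1)).foldl
     (fun out i =>
        if PySem.List.pyGetD source (i - 1) 0 < PySem.List.pyGetD source i 0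
        then out ++ [PySem.List.pyGetD source i 0] else out)
     []).reverse

-- ===== PRECONDITION & SPEC =====
def Spec_next_is_bigger (source : List Int) (out : List Int) : Prop := out = next_is_bigger_alt source
instance (source : List Int) (out : List Int) : Decidable (Spec_next_is_bigger source out) := by unfold Spec_next_is_bigger; infer_instance

-- ===== CLAIM (what is proved, stated in full; the proofs are below) =====
def Claim_equal_next_is_bigger : Prop := ∀ (source : List Int), Dom_next_is_bigger source → Spec_next_is_bigger source (next_is_bigger source)

-- ===== LEMMAS AND PROOFS =====

-- A's loop equals the forward pairwise filter.
theorem nib_loop (xs : List Int) (prev : Int) (acc : List Int) :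
    (xs.foldl (fun (st : List Int × Option Int) el =>
      ((match st.2 with
        | some p => if p < el then st.1 ++ [el] else st.1
        | none => st.1), some el)) (acc, some prev)).1
    = acc ++ (((prev :: xs).zip xs).filter (fun p => decide (p.1 < p.2))).map Prod.snd := by
  induction xs generalizing prev acc with
  | nil => simp
  | cons x xs ih =>
    simp only [List.foldl, List.zip_cons_cons, List.filter]
    by_cases h : prev < x
    · simp [h, ih x (acc ++ [x])]
    · simp [h, ih x acc]

-- forward index form equals the pairwise filter
theorem nib_fwd (source : List Int) :
    ((List.range (source.length - 1)).filter
        (fun k => decide (source.getD k 0 < source.getD (k+1) 0))).map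
      (fun k => source.getD (k+1) 0)
    = ((source.zip source.tail).filter (fun p => decide (p.1 < p.2))).map Prod.snd := by
  induction source with
  | nil => simp
  | cons x xs ih =>
    cases xs with
    | nil => simp
    | cons y ys =>
      simp only [List.length_cons, Nat.add_sub_cancel, List.range_succ_eq_map,
        List.filter_cons, List.filter_map,
        List.tail_cons, List.zip_cons_cons]
      by_cases h : x < y
      · simp only [h, decide_true, List.getD_cons_zero, List.getD_cons_succ, if_pos]
        refine ?_
        have := ih
        simp only [List.length_cons, Nat.add_sub_cancel, List.tail_cons] at this
        simpa [List.filter_map, List.map_map, Function.comp_def, h] using this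
      · have := ih
        simp only [List.length_cons, Nat.add_sub_cancel, List.tail_cons] at this
        simpa [List.filter_map, List.map_map, Function.comp_def, h] using this

-- ===== VERDICT (by name: the statement is the Claim_ definition above) =====
theorem next_is_bigger_spec : Claim_equal_next_is_bigger := by
  intro source _
  unfold Spec_next_is_bigger next_is_bigger next_is_bigger_alt
  rw [PySem.List.foldl_append_ite
        (p := fun i => PySem.List.pyGetD source (i - 1) 0 < PySem.List.pyGetD source i 0)
        (f := fun i => PySem.List.pyGetD source i 0)]
  rw [PySem.List.pyRange_neg_one_eq_reverse]
  simp only [List.filter_reverse, List.map_reverse, List.reverse_reverse, List.nil_append]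
  have hrange : PySem.List.pyRange 1 ((source.length : Int) - 1 + 1) 1
      = (List.range (source.length - 1)).map (fun k => ((k + 1 : Nat) : Int)) := by
    rw [PySem.List.pyRange_one]
    have h1 : ((source.length : Int) - 1 + 1 - 1).toNat = source.length - 1 := by omega
    rw [h1]
    apply List.map_congr_left
    intro k _
    push_cast; ring
  simp only [zero_add]
  rw [hrange]
  rw [List.filter_map, List.map_map]
  have hcong : ((List.range (source.length - 1)).filter
      ((fun i => decide (PySem.List.pyGetD source (i - 1) 0 < PySem.List.pyGetD source i 0)) ∘
        (fun k => ((k + 1 : Nat) : Int))))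
      = (List.range (source.length - 1)).filter
          (fun k => decide (source.getD k 0 < source.getD (k+1) 0)) := by
    apply List.filter_congr
    intro k _
    simp only [Function.comp_def]
    have e1 : ((k + 1 : Nat) : Int) - 1 = ((k : Nat) : Int) := by push_cast; ring
    rw [e1, PySem.List.pyGetD_natCast, PySem.List.pyGetD_natCast]
  rw [hcong]
  have hmap : ((List.range (source.length - 1)).filter
          (fun k => decide (source.getD k 0 < source.getD (k+1) 0))).map
        ((fun i => PySem.List.pyGetD source i 0) ∘ (fun k => ((k + 1 : Nat) : Int)))
      = ((List.range (source.length - 1)).filter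
          (fun k => decide (source.getD k 0 < source.getD (k+1) 0))).map
        (fun k => source.getD (k+1) 0) := by
    apply List.map_congr_left
    intro k _
    simp only [Function.comp_def]
    rw [PySem.List.pyGetD_natCast]
  rw [hmap, nib_fwd]
  cases source with
  | nil => rfl
  | cons x xs => simpa using nib_loop xs x []
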